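-- pv_equiv track=rewrite | github.com/Cago2000/Advent_Of_Code_2024 | Day 9/aoc_9.py | is_defragmentated
-- ===== SOURCE A (Python) =====
-- import string
--
-- def is_defragmentated(expanded_disk_map: list[string]) -> bool:
--     digit_count = 0
--     for c in expanded_disk_map:
--         if c != ".":
--             digit_count += 1
--     digits_in_row = 0
--     for c in expanded_disk_map:
--         if c == ".": break
--         digits_in_row += 1
--     if digit_count == digits_in_row:
--         return True
--     else:
--         return False
-- ===== SOURCE B (Python) =====
-- def is_defragmentated(expanded_disk_map: list) -> bool:
--     seen_dot = False
--     for c in expanded_disk_map: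
--         if c == ".":
--             seen_dot = True
--         elif seen_dot:
--             return False
--     return True
-- ===== Notes on version B (the rewrite author's own statement) =====
-- stated objective: simpler
-- what changed: Replaces A's two passes (count all non-dots, count the leading non-dot run, compare the counters) with one early-exit scan keeping only a seen_dot flag and returning False as soon as a non-dot follows a dot.
import Mathlib
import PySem

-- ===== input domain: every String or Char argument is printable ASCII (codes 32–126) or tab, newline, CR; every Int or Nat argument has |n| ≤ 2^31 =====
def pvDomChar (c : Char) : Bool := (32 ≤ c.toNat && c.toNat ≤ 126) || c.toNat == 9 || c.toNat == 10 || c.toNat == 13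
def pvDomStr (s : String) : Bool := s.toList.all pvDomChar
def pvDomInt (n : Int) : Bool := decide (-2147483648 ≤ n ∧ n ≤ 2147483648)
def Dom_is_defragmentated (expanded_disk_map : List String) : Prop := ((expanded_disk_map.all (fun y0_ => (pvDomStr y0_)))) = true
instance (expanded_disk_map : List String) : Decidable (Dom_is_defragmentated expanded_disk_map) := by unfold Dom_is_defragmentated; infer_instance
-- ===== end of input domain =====

-- ===== PORT A =====
-- digits_in_row loop: counts the leading non-"." run, 'break' on the first "."
def pvRowCount (l : List String) : Nat :=
  match l with
  | [] => 0
  | c :: rest => if c == "." then 0 else 1 + pvRowCount rest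

def is_defragmentated (expanded_disk_map : List String) : Bool :=
  let digit_count := expanded_disk_map.foldl (fun acc c => if c != "." then acc + 1 else acc) (0 : Nat)
  let digits_in_row := pvRowCount expanded_disk_map
  if digit_count == digits_in_row then true else false

-- ===== PORT B =====
-- single early-exit scan with a seen_dot flag
def pvScan (seen_dot : Bool) (l : List String) : Bool :=
  match l with
  | [] => true
  | c :: rest =>
      if c == "." then pvScan true rest
      else if seen_dot then false
      else pvScan seen_dot rest

def is_defragmentated_alt (expanded_disk_map : List String) : Bool :=
  pvScan false expanded_disk_map

-- ===== PRECONDITION & SPEC =====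
def Spec_is_defragmentated (expanded_disk_map : List String) (out : Bool) : Prop := out = is_defragmentated_alt expanded_disk_map
instance (expanded_disk_map : List String) (out : Bool) : Decidable (Spec_is_defragmentated expanded_disk_map out) := by unfold Spec_is_defragmentated; infer_instance

-- ===== CLAIM (what is proved, stated in full; the proofs are below) =====
def Claim_equal_is_defragmentated : Prop := ∀ (expanded_disk_map : List String), Dom_is_defragmentated expanded_disk_map → Spec_is_defragmentated expanded_disk_map (is_defragmentated expanded_disk_map)

-- ===== LEMMAS AND PROOFS =====

-- ===== VERDICT (by name: the statement is the Claim_ definition above) =====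
def pvCnt (l : List String) : Nat := (l.filter (fun c => c != ".")).length

theorem foldl_cnt (l : List String) (a : Nat) :
    l.foldl (fun acc c => if c != "." then acc + 1 else acc) a = a + pvCnt l := by
  induction l generalizing a with
  | nil => simp [pvCnt]
  | cons c rest ih =>
      simp only [List.foldl_cons]
      rw [ih]
      simp only [pvCnt, List.filter_cons]
      by_cases h : c = "." <;> simp [h] <;> omega

theorem scan_true (l : List String) : pvScan true l = decide (pvCnt l = 0) := by
  induction l with
  | nil => simp [pvScan, pvCnt]
  | cons c rest ih =>
      simp only [pvScan, pvCnt, List.filter_cons]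
      by_cases h : c = "." <;> simp [h, ih, pvCnt]

theorem scan_false (l : List String) : pvScan false l = decide (pvCnt l = pvRowCount l) := by
  induction l with
  | nil => simp [pvScan, pvCnt, pvRowCount]
  | cons c rest ih =>
      simp only [pvScan, pvRowCount, pvCnt, List.filter_cons]
      by_cases h : c = "." <;> simp [h, ih, scan_true, pvCnt] <;> omega

theorem is_defragmentated_spec : Claim_equal_is_defragmentated := by
  intro l _
  unfold Spec_is_defragmentated is_defragmentated is_defragmentated_alt
  simp only [foldl_cnt, scan_false, Nat.zero_add, beq_iff_eq]
  split_ifs with h <;> simp [h]
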